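-- pv_equiv track=rewrite | github.com/naivechen/RAGBookCode | chapter-6/6-8.py | rule_based_chunking
-- ===== SOURCE A (Python) =====
-- def rule_based_chunking(text):
--     chunks = []
--     current_chunk = []
--     for line in text.split("\n"):
--         if line.strip(): # 如果行不为空
--             current_chunk.append(line.strip())
--         elif current_chunk: # 如果遇到空行且当前分块不为空，则将当前分块加入结果列表中
--             chunks.append("\n".join(current_chunk))
--             current_chunk = []
--     if current_chunk: # 处理最后一个分块
--         chunks.append("\n".join(current_chunk))
--     return chunks
-- ===== SOURCE B (Python) =====
-- def rule_based_chunking(text):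
--     lines = text.split("\n")
--     chunks = []
--     i = 0
--     n = len(lines)
--     while i < n:
--         if not lines[i].strip():
--             i += 1
--             continue
--         j = i
--         while j < n and lines[j].strip():
--             j += 1
--         chunks.append("\n".join(s.strip() for s in lines[i:j]))
--         i = j
--     return chunks
-- ===== Notes on version B (the rewrite author's own statement) =====
-- stated objective: alternative
-- what changed: B splits the line list into maximal runs of non-blank lines (scan to the end of each run, join, jump past it) instead of A's accumulator-with-flush state machine.
import Mathlib
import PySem

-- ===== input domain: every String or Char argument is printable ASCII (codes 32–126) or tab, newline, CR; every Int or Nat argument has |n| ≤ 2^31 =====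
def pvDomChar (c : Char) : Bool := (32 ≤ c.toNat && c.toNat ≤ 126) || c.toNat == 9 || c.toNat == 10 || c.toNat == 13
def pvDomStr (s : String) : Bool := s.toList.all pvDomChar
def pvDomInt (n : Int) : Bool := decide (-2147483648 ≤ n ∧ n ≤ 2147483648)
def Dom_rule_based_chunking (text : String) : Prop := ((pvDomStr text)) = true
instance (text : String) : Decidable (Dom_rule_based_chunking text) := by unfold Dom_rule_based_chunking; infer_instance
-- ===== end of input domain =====

-- B groups the line list into maximal runs of non-blank lines (take each run, join it, jump past
-- it) instead of A's accumulator-with-flush state machine; same linear cost, different decomposition.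

-- ===== PORT A =====
-- text.split("\n"): sep is the non-empty literal "\n", so split? always returns some; getD [] unwraps it.
def rule_based_chunking (text : String) : List String :=
  let st := ((PySem.Str.split? text "\n").getD []).foldl
    (fun st line =>
      if PySem.Str.strip line ≠ "" then (st.1, st.2 ++ [PySem.Str.strip line])
      else if st.2 ≠ [] then (st.1 ++ [PySem.Str.join "\n" st.2], ([] : List String))
      else st)
    (([] : List String), ([] : List String))
  if st.2 ≠ [] then st.1 ++ [PySem.Str.join "\n" st.2] else st.1

-- ===== PORT B =====
def pvBlank (l : String) : Bool := PySem.Str.strip l == ""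

-- the outer while loop of Source B: skip a blank line, or take the whole non-blank run and jump past it
def rule_based_chunking_altGo : List String → List String
  | [] => []
  | l :: ls =>
    if pvBlank l then rule_based_chunking_altGo ls
    else
      PySem.Str.join "\n" (((l :: ls).takeWhile (fun x => !pvBlank x)).map PySem.Str.strip)
        :: rule_based_chunking_altGo ((l :: ls).dropWhile (fun x => !pvBlank x))
termination_by lines => lines.length
decreasing_by
  · simp
  · rename_i h
    have hd : (List.dropWhile (fun x => !pvBlank x) (l :: ls)).length ≤ ls.length := by
      rw [List.dropWhile_cons_of_pos (by simp_all)]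
      exact List.length_dropWhile_le _ _
    simpa using Nat.lt_succ_of_le hd

def rule_based_chunking_alt (text : String) : List String :=
  rule_based_chunking_altGo ((PySem.Str.split? text "\n").getD [])

-- ===== PRECONDITION & SPEC =====
def Spec_rule_based_chunking (text : String) (out : List String) : Prop := out = rule_based_chunking_alt text
instance (text : String) (out : List String) : Decidable (Spec_rule_based_chunking text out) := by unfold Spec_rule_based_chunking; infer_instance

-- ===== CLAIM (what is proved, stated in full; the proofs are below) =====
def Claim_equal_rule_based_chunking : Prop := ∀ (text : String), Dom_rule_based_chunking text → Spec_rule_based_chunking text (rule_based_chunking text)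

-- ===== LEMMAS AND PROOFS =====

-- A's loop body and final flush, as named functions (definitionally equal to the port's lambda)
def pvStep (st : List String × List String) (line : String) : List String × List String :=
  if PySem.Str.strip line ≠ "" then (st.1, st.2 ++ [PySem.Str.strip line])
  else if st.2 ≠ [] then (st.1 ++ [PySem.Str.join "\n" st.2], ([] : List String))
  else st

def pvFinal (st : List String × List String) : List String :=
  if st.2 ≠ [] then st.1 ++ [PySem.Str.join "\n" st.2] else st.1

-- A's loop unrolled as a recursion on the remaining lines, with the pending chunk as parameter.
def pvGoP : List String → List String → List String
  | cur, [] => if cur ≠ [] then [PySem.Str.join "\n" cur] else []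
  | cur, l :: ls =>
    if PySem.Str.strip l ≠ "" then pvGoP (cur ++ [PySem.Str.strip l]) ls
    else if cur ≠ [] then PySem.Str.join "\n" cur :: pvGoP [] ls
    else pvGoP [] ls

theorem pvFoldl_eq_goP (lines : List String) (acc cur : List String) :
    pvFinal (lines.foldl pvStep (acc, cur)) = acc ++ pvGoP cur lines := by
  induction lines generalizing acc cur with
  | nil => simp only [List.foldl_nil, pvFinal, pvGoP]; split_ifs <;> simp
  | cons l ls ih =>
    simp only [List.foldl_cons, pvGoP]
    conv_lhs => rw [pvStep]
    split_ifs with h1 h2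
    · exact ih _ _
    · rw [ih]; simp
    · have hc : cur = [] := by simpa using h2
      subst hc; exact ih _ _

theorem pvGoP_eq_altGo (lines : List String) :
    (∀ cur, cur ≠ [] →
      pvGoP cur lines =
        PySem.Str.join "\n" (cur ++ (lines.takeWhile (fun x => !pvBlank x)).map PySem.Str.strip)
          :: rule_based_chunking_altGo (lines.dropWhile (fun x => !pvBlank x)))
    ∧ pvGoP [] lines = rule_based_chunking_altGo lines := by
  induction lines with
  | nil => simp [pvGoP, rule_based_chunking_altGo]
  | cons l ls ih =>
    by_cases hb : pvBlank l = true
    · have hs : PySem.Str.strip l = "" := by simpa [pvBlank] using hb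
      have hTW : List.takeWhile (fun x => !pvBlank x) (l :: ls) = [] := by
        simp [hb]
      have hDW : List.dropWhile (fun x => !pvBlank x) (l :: ls) = l :: ls := by
        simp [hb]
      constructor
      · intro cur hcur
        rw [pvGoP, if_neg (by simp [hs]), if_pos hcur, ih.2, hTW, hDW,
            rule_based_chunking_altGo, if_pos hb]
        simp
      · rw [pvGoP, if_neg (by simp [hs]), if_neg (by simp),
            rule_based_chunking_altGo, if_pos hb]
        exact ih.2
    · have hs : PySem.Str.strip l ≠ "" := by simpa [pvBlank] using hb
      have hbf : pvBlank l = false := by simpa using hb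
      have hTW : List.takeWhile (fun x => !pvBlank x) (l :: ls)
          = l :: List.takeWhile (fun x => !pvBlank x) ls := by
        simp [hbf]
      have hDW : List.dropWhile (fun x => !pvBlank x) (l :: ls)
          = List.dropWhile (fun x => !pvBlank x) ls := by
        simp [hbf]
      constructor
      · intro cur hcur
        rw [pvGoP, if_pos hs, ih.1 (cur ++ [PySem.Str.strip l]) (by simp), hTW, hDW]
        simp
      · rw [pvGoP, if_pos hs]
        simp only [List.nil_append]
        rw [ih.1 [PySem.Str.strip l] (by simp),
            rule_based_chunking_altGo, if_neg hb, hTW, hDW]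
        simp

-- ===== VERDICT (by name: the statement is the Claim_ definition above) =====
theorem rule_based_chunking_spec : Claim_equal_rule_based_chunking := by
  intro text _
  show pvFinal (((PySem.Str.split? text "\n").getD []).foldl pvStep ([], []))
      = rule_based_chunking_alt text
  rw [pvFoldl_eq_goP, (pvGoP_eq_altGo _).2]
  rfl
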